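-- pv_equiv track=rewrite | github.com/mohammadoumar/AMwithLLMs | cdcp/utils/.ipynb_checkpoints/post_processing-checkpoint.py | harmonize_preds_arc
-- ===== SOURCE A (Python) =====
-- def opposite_arc(component_type):
--
--     if component_type == "reason":
--         return "evidence"
--     elif component_type == "evidence":
--         return "reason"
--
-- def harmonize_preds_arc(grounds, preds):
--
--     l1, l2 = len(preds), len(grounds)
--     if l1 < l2:
--         diff = l2 - l1
--         preds = preds + [opposite_arc(x) for x in grounds[l1:]]
--     else:
--         preds = preds[:l2]
--
--     return preds
-- ===== SOURCE B (Python) =====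
-- def opposite_arc(component_type):
--     if component_type == "reason":
--         return "evidence"
--     elif component_type == "evidence":
--         return "reason"
--
-- def harmonize_preds_arc(grounds, preds):
--     # lockstep consumption: one loop over grounds draining an iterator over preds;
--     # no lengths, no slicing, no shorter/longer case analysis
--     _EXHAUSTED = object()
--     it = iter(preds)
--     out = []
--     for g in grounds:
--         x = next(it, _EXHAUSTED)
--         out.append(opposite_arc(g) if x is _EXHAUSTED else x)
--     return out
-- ===== Notes on version B (the rewrite author's own statement) =====
-- stated objective: alternative
-- what changed: Replaces A's length computation and shorter/longer branch (append a mapped tail vs slice-truncate) by one loop over grounds that drains an iterator over preds in lockstep, emitting the drawn prediction while the iterator lasts and the opposite arc of the ground afterwards.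
-- outside the precondition, e.g. on harmonize_preds_arc(['x'], []): A returns [None], B returns [None]
import Mathlib
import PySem

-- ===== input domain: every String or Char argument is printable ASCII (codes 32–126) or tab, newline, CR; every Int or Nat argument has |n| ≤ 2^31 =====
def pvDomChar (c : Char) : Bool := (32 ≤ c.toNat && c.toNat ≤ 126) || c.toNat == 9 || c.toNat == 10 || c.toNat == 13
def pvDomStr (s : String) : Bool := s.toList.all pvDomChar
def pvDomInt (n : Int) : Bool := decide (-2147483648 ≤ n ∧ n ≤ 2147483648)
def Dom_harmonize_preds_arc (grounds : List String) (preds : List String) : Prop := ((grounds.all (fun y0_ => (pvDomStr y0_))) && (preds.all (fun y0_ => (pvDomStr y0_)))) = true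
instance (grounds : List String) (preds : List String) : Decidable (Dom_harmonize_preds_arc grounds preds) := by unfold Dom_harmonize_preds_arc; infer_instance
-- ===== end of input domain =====

-- B replaces A's length-branch slice/append by one loop over grounds draining an iterator over preds in lockstep (objective: alternative).


-- ===== PORT A =====
-- Python's opposite_arc returns None on any other string; Pre_ excludes inputs where
-- that branch is reached, so the "" placeholder is never part of the result inside Pre_.
def pvOppA (component_type : String) : String :=
  if component_type == "reason" then "evidence"
  else if component_type == "evidence" then "reason"
  else ""

def harmonize_preds_arc (grounds : List String) (preds : List String) : List String :=
  let l1 := preds.length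
  let l2 := grounds.length
  if l1 < l2 then
    -- grounds[l1:] with 0 ≤ l1 is exactly List.drop l1; preds + [...] is append
    preds ++ (grounds.drop l1).map pvOppA
  else
    -- preds[:l2] with 0 ≤ l2 is exactly List.take l2
    preds.take l2

-- ===== PORT B =====
-- same None-returning helper as in Source B; "" placeholder unreachable inside Pre_
def pvOppB (component_type : String) : String :=
  if component_type == "reason" then "evidence"
  else if component_type == "evidence" then "reason"
  else ""

-- the for-loop over grounds: state = (out so far, remaining items of the preds iterator);
-- next(it, _EXHAUSTED) is the match on the remaining-list head
def harmonize_preds_arc_alt (grounds : List String) (preds : List String) : List String :=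
  (grounds.foldl (fun (st : List String × List String) g =>
      match st.2 with
      | [] => (st.1 ++ [pvOppB g], [])
      | x :: xs => (st.1 ++ [x], xs)) ([], preds)).1

-- ===== PRECONDITION & SPEC =====
-- Pre_ excludes inputs where preds is shorter than grounds and the padded tail of grounds
-- contains a string other than "reason"/"evidence": there Python's opposite_arc returns
-- None, so A's result contains None, which is not a value of the declared List[str] type.
def Pre_harmonize_preds_arc (grounds : List String) (preds : List String) : Prop :=
  ∀ s ∈ grounds.drop preds.length, s = "reason" ∨ s = "evidence"
instance (grounds : List String) (preds : List String) : Decidable (Pre_harmonize_preds_arc grounds preds) := by unfold Pre_harmonize_preds_arc; infer_instance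

def pvWitness_harmonize_preds_arc : List String × List String :=
  (["reason", "evidence", "reason"], ["evidence"])

def Spec_harmonize_preds_arc (grounds : List String) (preds : List String) (out : List String) : Prop := out = harmonize_preds_arc_alt grounds preds
instance (grounds : List String) (preds : List String) (out : List String) : Decidable (Spec_harmonize_preds_arc grounds preds out) := by unfold Spec_harmonize_preds_arc; infer_instance

-- ===== CLAIM (what is proved, stated in full; the proofs are below) =====
def Claim_equal_harmonize_preds_arc : Prop := ∀ (grounds : List String) (preds : List String), Dom_harmonize_preds_arc grounds preds → Pre_harmonize_preds_arc grounds preds → Spec_harmonize_preds_arc grounds preds (harmonize_preds_arc grounds preds)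

-- ===== LEMMAS AND PROOFS =====

theorem pvOpp_eq : pvOppA = pvOppB := rfl

-- proof-side recursive characterization of the lockstep loop
def pvRec : List String → List String → List String
  | [], _ => []
  | g :: gs, [] => pvOppB g :: pvRec gs []
  | _ :: gs, _p :: ps => _p :: pvRec gs ps

-- the fold carrying (out, rest) accumulates out ++ pvRec grounds rest
theorem fold_eq_rec (grounds : List String) : ∀ (preds out : List String),
    (grounds.foldl (fun (st : List String × List String) g =>
      match st.2 with
      | [] => (st.1 ++ [pvOppB g], [])
      | x :: xs => (st.1 ++ [x], xs)) (out, preds)).1 = out ++ pvRec grounds preds := by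
  induction grounds with
  | nil => intro preds out; simp [pvRec]
  | cons g gs ih =>
    intro preds out
    cases preds with
    | nil => simp [pvRec, List.foldl_cons, ih]
    | cons p ps => simp [pvRec, List.foldl_cons, ih]

-- A's slice/append result equals the lockstep recursion, on all inputs
theorem a_eq_rec (grounds : List String) : ∀ (preds : List String),
    harmonize_preds_arc grounds preds = pvRec grounds preds := by
  induction grounds with
  | nil => intro preds; simp [harmonize_preds_arc, pvRec]
  | cons g gs ih =>
    intro preds
    cases preds with
    | nil =>
      have h0 := ih []
      simp [harmonize_preds_arc, pvRec, pvOpp_eq] at h0 ⊢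
      cases gs with
      | nil => simp [pvRec]
      | cons h t => simpa [harmonize_preds_arc] using h0
    | cons p ps =>
      have h0 := ih ps
      simp only [harmonize_preds_arc, pvRec] at h0 ⊢
      by_cases h : ps.length < gs.length
      · simp [List.length_cons, h, Nat.succ_lt_succ h, List.cons_append] at h0 ⊢
        exact h0
      · simp [List.length_cons, h, Nat.not_lt.mpr (Nat.succ_le_succ (Nat.not_lt.mp h))] at h0 ⊢
        exact h0

-- ===== VERDICT (by name: the statement is the Claim_ definition above) =====
theorem harmonize_preds_arc_spec : Claim_equal_harmonize_preds_arc := by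
  intro grounds preds _ _
  unfold Spec_harmonize_preds_arc harmonize_preds_arc_alt
  rw [fold_eq_rec, List.nil_append, a_eq_rec]
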